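-- pv_equiv track=rewrite | github.com/gdgc-fptu-hcmc/travel-assistant | agents/agent_manager.py | _build_context_from_history
-- ===== SOURCE A (Python) =====
-- from typing import Dict, List, Any, Optional
--
-- def _build_context_from_history(history: List) -> Dict[str, Any]:
--     """Xây dựng ngữ cảnh từ lịch sử hội thoại"""
--     context = {
--         'locations': [],
--         'dates': [],
--         'preferences': []
--     }
--
--     if not history:
--         return context
--
--     # Lấy các thông tin quan trọng từ lịch sử
--     for message in history:
--         if 'entities' in message:
--             # Thêm locations từ entities vào context
--             if 'locations' in message['entities']:
--                 for location in message['entities']['locations']: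
--                     if location not in context['locations']:
--                         context['locations'].append(location)
--
--             # Thêm dates từ entities vào context
--             if 'dates' in message['entities']:
--                 for date in message['entities']['dates']:
--                     if date not in context['dates']:
--                         context['dates'].append(date)
--
--     return context
-- ===== SOURCE B (Python) =====
-- def _build_context_from_history(history):
--     # Declarative pipeline: flatten all entity values with comprehensions,
--     # then keep each element only if it does not occur in the flat list
--     # before its own position (first-occurrence filter by prefix lookup).
--     flat_locs = [loc for m in history if 'entities' in m
--                  for loc in m['entities'].get('locations', [])]
--     flat_dates = [d for m in history if 'entities' in m
--                   for d in m['entities'].get('dates', [])]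
--     return {
--         'locations': [x for i, x in enumerate(flat_locs) if x not in flat_locs[:i]],
--         'dates': [x for i, x in enumerate(flat_dates) if x not in flat_dates[:i]],
--         'preferences': [],
--     }
-- ===== Notes on version B (the rewrite author's own statement) =====
-- stated objective: alternative
-- what changed: Replaces A's imperative check-before-append single pass (membership test against the growing output) with a declarative pipeline: flatten all entity values via comprehensions, then filter each element by whether it occurs in the flat list's prefix before its own index.
import Mathlib
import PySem

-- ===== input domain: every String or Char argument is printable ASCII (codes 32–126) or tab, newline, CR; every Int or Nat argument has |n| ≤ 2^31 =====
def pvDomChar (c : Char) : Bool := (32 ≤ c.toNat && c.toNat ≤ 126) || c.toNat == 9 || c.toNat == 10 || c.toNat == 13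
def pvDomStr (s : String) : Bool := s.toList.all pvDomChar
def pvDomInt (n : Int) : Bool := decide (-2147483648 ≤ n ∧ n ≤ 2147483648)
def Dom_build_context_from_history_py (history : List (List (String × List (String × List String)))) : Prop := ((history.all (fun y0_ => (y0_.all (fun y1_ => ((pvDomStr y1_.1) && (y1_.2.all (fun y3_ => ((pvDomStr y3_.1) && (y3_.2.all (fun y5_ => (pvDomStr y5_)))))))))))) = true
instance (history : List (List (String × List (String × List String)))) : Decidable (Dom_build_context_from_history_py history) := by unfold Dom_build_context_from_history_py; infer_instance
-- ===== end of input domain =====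

-- ===== PORT A =====
-- Header: B flattens all entity values with comprehensions and then keeps each element
-- only if it is absent from the flat list's prefix before its index, instead of A's
-- membership check against the growing output; objective: alternative. No observable mutation.
def pvAddNew (acc : List String) (xs : List String) : List String :=
  xs.foldl (fun a x => if a.contains x then a else a ++ [x]) acc

def build_context_from_history_py (history : List (List (String × List (String × List String)))) : List (String × List String) :=
  if history.isEmpty then
    [("locations", []), ("dates", []), ("preferences", [])]
  else
    let st := history.foldl (fun (st : List String × List String) msg =>
      match (PySem.Dict.mk msg).get? "entities" with
      | none => st
      | some ents =>
        let l := match (PySem.Dict.mk ents).get? "locations" with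
          | none => st.1
          | some ls => pvAddNew st.1 ls
        let d := match (PySem.Dict.mk ents).get? "dates" with
          | none => st.2
          | some ds => pvAddNew st.2 ds
        (l, d)) ([], [])
    [("locations", st.1), ("dates", st.2), ("preferences", [])]

-- ===== PORT B =====
-- Source B phase 1: the flattening comprehension
-- [v for m in history if 'entities' in m for v in m['entities'].get(key, [])]
def pvFlat (key : String) (history : List (List (String × List (String × List String)))) : List String :=
  history.flatMap (fun m =>
    match (PySem.Dict.mk m).get? "entities" with
    | none => []
    | some ents => (PySem.Dict.mk ents).getD key [])

-- Source B phase 2: [x for i, x in enumerate(flat) if x not in flat[:i]]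
def pvKeepFirst (flat : List String) : List String :=
  (PySem.List.enumerate flat).filterMap (fun p =>
    if (PySem.List.slice flat none (some p.1)).contains p.2 then none else some p.2)

def build_context_from_history_py_alt (history : List (List (String × List (String × List String)))) : List (String × List String) :=
  [("locations", pvKeepFirst (pvFlat "locations" history)),
   ("dates", pvKeepFirst (pvFlat "dates" history)),
   ("preferences", [])]

-- ===== PRECONDITION & SPEC =====
def Spec_build_context_from_history_py (history : List (List (String × List (String × List String)))) (out : List (String × List String)) : Prop := out = build_context_from_history_py_alt history
instance (history : List (List (String × List (String × List String)))) (out : List (String × List String)) : Decidable (Spec_build_context_from_history_py history out) := by unfold Spec_build_context_from_history_py; infer_instance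

-- ===== CLAIM (what is proved, stated in full; the proofs are below) =====
def Claim_equal_build_context_from_history_py : Prop := ∀ (history : List (List (String × List (String × List String)))), Dom_build_context_from_history_py history → Spec_build_context_from_history_py history (build_context_from_history_py history)

-- ===== LEMMAS AND PROOFS =====
theorem pvAddNew_append (a xs ys : List String) :
    pvAddNew (pvAddNew a xs) ys = pvAddNew a (xs ++ ys) := by
  simp [pvAddNew, List.foldl_append]

-- A's fold over history equals pvAddNew seeded into the flattened lists
theorem pvA_fold_eq (history : List (List (String × List (String × List String))))
    (l d : List String) :
    history.foldl (fun (st : List String × List String) msg =>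
      match (PySem.Dict.mk msg).get? "entities" with
      | none => st
      | some ents =>
        let l' := match (PySem.Dict.mk ents).get? "locations" with
          | none => st.1
          | some ls => pvAddNew st.1 ls
        let d' := match (PySem.Dict.mk ents).get? "dates" with
          | none => st.2
          | some ds => pvAddNew st.2 ds
        (l', d')) (l, d)
    = (pvAddNew l (pvFlat "locations" history), pvAddNew d (pvFlat "dates" history)) := by
  induction history generalizing l d with
  | nil => simp [pvFlat, pvAddNew]
  | cons msg rest ih =>
    simp only [pvFlat, List.flatMap_cons, List.foldl_cons]
    cases h : (PySem.Dict.mk msg).get? "entities" with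
    | none => simpa only [h, List.nil_append, pvFlat] using ih l d
    | some ents =>
      have hl : (match (PySem.Dict.mk ents).get? "locations" with
          | none => l
          | some ls => pvAddNew l ls) = pvAddNew l ((PySem.Dict.mk ents).getD "locations" []) := by
        cases hx : (PySem.Dict.mk ents).get? "locations" <;>
          simp [PySem.Dict.getD, hx, pvAddNew]
      have hd : (match (PySem.Dict.mk ents).get? "dates" with
          | none => d
          | some ds => pvAddNew d ds) = pvAddNew d ((PySem.Dict.mk ents).getD "dates" []) := by
        cases hx : (PySem.Dict.mk ents).get? "dates" <;>
          simp [PySem.Dict.getD, hx, pvAddNew]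
      rw [ih, hl, hd]
      simp only [pvAddNew_append, pvFlat]

-- the prefix-filter comprehension, generalized over an already-seen prefix
theorem pvKeep_general (rest pre a : List String)
    (hinv : ∀ y, a.contains y = pre.contains y) :
    a ++ (PySem.List.enumerate rest (pre.length : Int)).filterMap (fun p =>
      if (PySem.List.slice (pre ++ rest) none (some p.1)).contains p.2 then none else some p.2)
    = pvAddNew a rest := by
  induction rest generalizing pre a with
  | nil => simp [PySem.List.enumerate, pvAddNew]
  | cons x rest ih =>
    rw [PySem.List.enumerate_cons, List.filterMap_cons]
    have hslice : PySem.List.slice (pre ++ x :: rest) none (some (pre.length : Int)) = pre := by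
      rw [PySem.List.slice_to_natCast]
      simp
    have hshift : pre ++ x :: rest = (pre ++ [x]) ++ rest := by simp
    have hlen : (pre.length : Int) + 1 = ((pre ++ [x]).length : Int) := by
      simp
    have hAdd : pvAddNew a (x :: rest)
        = pvAddNew (if a.contains x then a else a ++ [x]) rest := by
      simp [pvAddNew]
    rw [hslice, hAdd, hinv x]
    by_cases hx : pre.contains x = true
    · rw [if_pos hx, if_pos hx, hshift, hlen]
      refine ih (pre ++ [x]) a (fun y => ?_)
      rw [hinv y]
      simp at hx ⊢
      rcases eq_or_ne y x with rfl | hyx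
      · simp [hx]
      · simp [hyx]
    · rw [if_neg hx, if_neg hx, hshift, hlen]
      have hstep := ih (pre ++ [x]) (a ++ [x]) (fun y => by
        have h := hinv y
        simp at h ⊢
        simp [h])
      rw [← hstep]
      simp
-- closed form: the comprehension from the empty prefix is pvAddNew []
theorem pvKeepFirst_eq (xs : List String) : pvKeepFirst xs = pvAddNew [] xs := by
  have := pvKeep_general xs [] [] (fun y => rfl)
  simpa [pvKeepFirst, PySem.List.enumerate] using this

-- ===== VERDICT (by name: the statement is the Claim_ definition above) =====
theorem build_context_from_history_py_spec : Claim_equal_build_context_from_history_py := by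
  intro history _
  show build_context_from_history_py history = build_context_from_history_py_alt history
  unfold build_context_from_history_py build_context_from_history_py_alt
  cases history with
  | nil => simp [pvFlat, pvKeepFirst]
  | cons msg rest =>
    simp only [List.isEmpty_cons, if_neg Bool.false_ne_true]
    rw [pvA_fold_eq, pvKeepFirst_eq, pvKeepFirst_eq]
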